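-- pv_equiv track=rewrite | github.com/dedx-erpa/dedx | mprun.py | dist_zs
-- ===== SOURCE A (Python) =====
-- def dist_zs(izs, np, aa=2, mloss=24):
--     n = len(izs)
--
--     xs = []
--     for i in range(len(izs)):
--         xs.append((izs[i],aa,mloss))
--
--     a = [None]*np
--     for i in range(0, n, np):
--         ni = min(i+np, n)
--         for j in range(i,ni):
--             if a[j-i] is None:
--                 a[j-i] = []
--             a[j-i].append(xs[j])
--     return a
-- ===== SOURCE B (Python) =====
-- def dist_zs(izs, np, aa=2, mloss=24):
--     # Gather per bucket: bucket k pulls the strided indices k, k+np, k+2*np, ...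
--     # (A scatters the input forward chunk by chunk instead.)
--     n = len(izs)
--     return [[(izs[j], aa, mloss) for j in range(k, n, np)] or None
--             for k in range(np)]
-- ===== Notes on version B (the rewrite author's own statement) =====
-- stated objective: simpler
-- what changed: Replaces A's two-pass chunked scatter (build xs, then push each chunk element into its bucket by mutation) with a direct one-expression gather: each bucket k is the strided comprehension over indices k, k+np, ..., with 'or None' for empty buckets.
-- outside the precondition, e.g. on dist_zs([1, 2], 0, 2, 24): A raises ValueError, B returns []
-- crash fix: When np == 0, A raises ValueError from range(0, n, 0); B naturally returns [] (range(0) is empty). — e.g. on dist_zs([1, 2], 0, 2, 24): A raises ValueError, B returns []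
import Mathlib
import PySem

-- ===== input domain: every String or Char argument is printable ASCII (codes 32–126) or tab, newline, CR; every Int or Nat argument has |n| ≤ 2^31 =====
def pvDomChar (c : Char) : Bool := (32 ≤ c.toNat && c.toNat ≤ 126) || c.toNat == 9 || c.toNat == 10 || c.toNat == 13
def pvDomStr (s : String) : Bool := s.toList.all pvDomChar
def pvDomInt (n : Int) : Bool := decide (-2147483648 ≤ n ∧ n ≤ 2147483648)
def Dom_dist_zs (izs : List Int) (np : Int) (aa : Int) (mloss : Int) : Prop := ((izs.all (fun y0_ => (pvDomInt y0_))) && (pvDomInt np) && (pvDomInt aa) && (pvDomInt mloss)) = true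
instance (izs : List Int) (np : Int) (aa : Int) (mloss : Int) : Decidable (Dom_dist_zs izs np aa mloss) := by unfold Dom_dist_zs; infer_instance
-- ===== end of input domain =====

-- B replaces A's chunked scatter with a per-bucket strided gather (objective: simpler).

-- ===== PORT A =====
-- literal port of A: build xs, then scatter chunks of size np into a by mutation
def dist_zs (izs : List Int) (np : Int) (aa : Int) (mloss : Int) : List (Option (List (Int × Int × Int))) :=
  let n : Int := (izs.length : Int)
  let xs : List (Int × Int × Int) :=
    (PySem.List.pyRange 0 (izs.length : Int) 1).foldl
      (fun xs i => xs ++ [(PySem.List.pyGetD izs i 0, aa, mloss)]) []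
  let a : List (Option (List (Int × Int × Int))) := List.replicate np.toNat none
  (PySem.List.pyRange 0 n np).foldl
    (fun a i =>
      let ni : Int := min (i + np) n
      (PySem.List.pyRange i ni 1).foldl
        (fun a j =>
          let cur := PySem.List.pyGetD a (j - i) none
          let cur := if cur = none then some ([] : List (Int × Int × Int)) else cur
          a.set (j - i).toNat (some (cur.getD [] ++ [PySem.List.pyGetD xs j (0, 0, 0)])))
        a)
    a

-- ===== PORT B =====
-- literal port of B: one comprehension per bucket, strided indices k, k+np, …
def dist_zs_alt (izs : List Int) (np : Int) (aa : Int) (mloss : Int) : List (Option (List (Int × Int × Int))) :=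
  let n : Int := (izs.length : Int)
  (PySem.List.pyRange 0 np 1).map (fun k =>
    let bucket := (PySem.List.pyRange k n np).map (fun j => (PySem.List.pyGetD izs j 0, aa, mloss))
    if bucket = [] then none else some bucket)

-- ===== PRECONDITION & SPEC =====
-- Pre_ excludes only np = 0, where A's range(0, n, 0) raises ValueError.
def Pre_dist_zs (izs : List Int) (np : Int) (aa : Int) (mloss : Int) : Prop := np ≠ 0
instance (izs : List Int) (np : Int) (aa : Int) (mloss : Int) : Decidable (Pre_dist_zs izs np aa mloss) := by unfold Pre_dist_zs; infer_instance
def pvWitness_dist_zs : List Int × Int × Int × Int := ([1, 2, 3, 4, 5], 2, 2, 24)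

-- When np == 0, A raises ValueError from range(0, n, 0); B naturally returns [].
def Raises_dist_zs (izs : List Int) (np : Int) (aa : Int) (mloss : Int) : Prop := np = 0
instance (izs : List Int) (np : Int) (aa : Int) (mloss : Int) : Decidable (Raises_dist_zs izs np aa mloss) := by unfold Raises_dist_zs; infer_instance
def pvRaiseWitness_dist_zs : List Int × Int × Int × Int := ([1, 2], 0, 2, 24)
def pvRaiseWitnessOut_dist_zs : List (Option (List (Int × Int × Int))) := []

def Spec_dist_zs (izs : List Int) (np : Int) (aa : Int) (mloss : Int) (out : List (Option (List (Int × Int × Int)))) : Prop := out = dist_zs_alt izs np aa mloss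
instance (izs : List Int) (np : Int) (aa : Int) (mloss : Int) (out : List (Option (List (Int × Int × Int)))) : Decidable (Spec_dist_zs izs np aa mloss out) := by unfold Spec_dist_zs; infer_instance

-- ===== CLAIM (what is proved, stated in full; the proofs are below) =====
def Claim_equal_dist_zs : Prop := ∀ (izs : List Int) (np : Int) (aa : Int) (mloss : Int), Dom_dist_zs izs np aa mloss → Pre_dist_zs izs np aa mloss → Spec_dist_zs izs np aa mloss (dist_zs izs np aa mloss)
def Claim_raises_dist_zs : Prop := (∀ (izs : List Int) (np : Int) (aa : Int) (mloss : Int), Dom_dist_zs izs np aa mloss → Raises_dist_zs izs np aa mloss → ¬ Pre_dist_zs izs np aa mloss) ∧ (Dom_dist_zs (pvRaiseWitness_dist_zs.1) (pvRaiseWitness_dist_zs.2.1) (pvRaiseWitness_dist_zs.2.2.1) (pvRaiseWitness_dist_zs.2.2.2) ∧ Raises_dist_zs (pvRaiseWitness_dist_zs.1) (pvRaiseWitness_dist_zs.2.1) (pvRaiseWitness_dist_zs.2.2.1) (pvRaiseWitness_dist_zs.2.2.2) ∧ dist_zs_alt (pvRaiseWitness_dist_zs.1) (pvRaiseWitness_dist_zs.2.1)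 (pvRaiseWitness_dist_zs.2.2.1) (pvRaiseWitness_dist_zs.2.2.2) = pvRaiseWitnessOut_dist_zs)

-- ===== LEMMAS AND PROOFS =====

-- proof-side clean model of A's scatter loop: process the input in chunks of size q+1
def pvAppendChunk {α : Type} : List (Option (List α)) → List α → List (Option (List α))
  | a, [] => a
  | [], _ :: _ => []
  | o :: a, x :: c => some (o.getD [] ++ [x]) :: pvAppendChunk a c

def pvChunkLoop {α : Type} (q : Nat) : List α → List (Option (List α)) → List (Option (List α))
  | [], a => a
  | x :: t, a => pvChunkLoop q (t.drop q) (pvAppendChunk a ((x :: t).take (q + 1)))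
  termination_by xs => xs.length
  decreasing_by simp

-- elements at positions k, k+(q+1), k+2(q+1), ...
def pvStrided {α : Type} (q k : Nat) : List α → List α
  | [] => []
  | x :: t => (((x :: t).take (q + 1))[k]?).toList ++ pvStrided q k (t.drop q)
  termination_by xs => xs.length
  decreasing_by simp

def pvCombine {α : Type} (o : Option (List α)) (l : List α) : Option (List α) :=
  match o, l with
  | none, [] => none
  | o, l => some (o.getD [] ++ l)

theorem pvAppendChunk_length {α : Type} (a : List (Option (List α))) (c : List α) :
    (pvAppendChunk a c).length = a.length := by
  induction a generalizing c with
  | nil => cases c <;> simp [pvAppendChunk]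
  | cons o a ih => cases c <;> simp [pvAppendChunk, ih]

theorem pvChunkLoop_length {α : Type} (q : Nat) (xs : List α) (a : List (Option (List α))) :
    (pvChunkLoop q xs a).length = a.length := by
  fun_induction pvChunkLoop q xs a with
  | case1 a => rfl
  | case2 x t a ih => rw [ih, pvAppendChunk_length]

theorem pvAppendChunk_getElem {α : Type} (a : List (Option (List α))) (cs : List α)
    (k : Nat) (hk : k < a.length) (h : (pvAppendChunk a cs).length = a.length) :
    (pvAppendChunk a cs)[k]'(by omega) =
      if hc : k < cs.length then some ((a[k]).getD [] ++ [cs[k]]) else a[k] := by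
  induction a generalizing cs k with
  | nil => simp at hk
  | cons o a ih =>
    cases cs with
    | nil => simp [pvAppendChunk]
    | cons x cs =>
      cases k with
      | zero => simp [pvAppendChunk]
      | succ k =>
        simp only [pvAppendChunk, List.getElem_cons_succ, List.length_cons]
        rw [ih _ _ (by simpa using hk) (pvAppendChunk_length a cs)]
        simp


-- range(a, b, s) facts for a positive / negative step s
theorem pvPyRange_pos_nil {a b s : Int} (h : b ≤ a) (hs : 0 < s) :
    PySem.List.pyRange a b s = [] := by
  rw [PySem.List.pyRange_of_pos a b hs]
  simp [not_lt.mpr h]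

theorem pvPyRange_pos_cons {a b s : Int} (h : a < b) (hs : 0 < s) :
    PySem.List.pyRange a b s = a :: PySem.List.pyRange (a + s) b s := by
  rw [PySem.List.pyRange_of_pos a b hs, PySem.List.pyRange_of_pos (a + s) b hs]
  have hD : (b - a + s - 1) / s = (b - a - 1) / s + 1 := by
    have := Int.add_mul_ediv_right (b - a - 1) 1 hs.ne'
    rw [one_mul] at this
    rw [← this]; ring_nf
  have hC' : (if a + s < b then ((b - (a + s) + s - 1) / s).toNat else 0) = ((b - a - 1) / s).toNat := by
    by_cases hc : a + s < b
    · simp only [if_pos hc]; congr 1; ring_nf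
    · have h0 : (b - a - 1) / s = 0 := Int.ediv_eq_zero_of_lt (by omega) (by omega)
      simp [hc, h0]
  have hnn : 0 ≤ (b - a - 1) / s := Int.ediv_nonneg (by omega) hs.le
  rw [hC']
  simp only [if_pos h, hD]
  have ht : ((b - a - 1) / s + 1).toNat = ((b - a - 1) / s).toNat + 1 := by omega
  rw [ht, List.range_succ_eq_map]
  simp only [List.map_cons, List.map_map]
  congr 1
  · simp
  · apply List.map_congr_left; intro k _; simp [Function.comp]; ring

theorem pvPyRange_shift {a b s : Int} (hs : 0 < s) :
    PySem.List.pyRange (a + s) b s = (PySem.List.pyRange a (b - s) s).map (· + s) := by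
  rw [PySem.List.pyRange_of_pos a (b - s) hs, PySem.List.pyRange_of_pos (a + s) b hs]
  rw [List.map_map]
  have hg : (a + s < b) ↔ (a < b - s) := by omega
  have hc : (b - (a + s) + s - 1) = (b - s - a + s - 1) := by ring
  rw [if_congr hg rfl rfl, hc]
  apply List.map_congr_left; intro k _; simp [Function.comp]; ring

theorem pvPyRange_negstep_nil {a b s : Int} (hs : s < 0) (h : a ≤ b) :
    PySem.List.pyRange a b s = [] := by
  simp [PySem.List.pyRange, hs.ne, not_lt.mpr h, not_lt.mpr hs.le]

theorem pvGetD_drop {α : Type} (xs : List α) (m : Nat) (j : Int) (hj : 0 ≤ j) (d : α) :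
    PySem.List.pyGetD (xs.drop m) j d = PySem.List.pyGetD xs (j + m) d := by
  rw [PySem.List.pyGetD_of_nonneg _ _ hj, PySem.List.pyGetD_of_nonneg _ _ (by omega)]
  have h : (j + m).toNat = m + j.toNat := by omega
  rw [h]
  simp [List.getD_eq_getElem?_getD, List.getElem?_drop]

theorem pvCombine_none {α : Type} (l : List α) :
    pvCombine none l = if l = [] then none else some l := by
  cases l <;> rfl

theorem pvCombine_some {α : Type} (l l' : List α) :
    pvCombine (some l) l' = some (l ++ l') := by
  cases l' <;> rfl

theorem pvCombine_cons {α : Type} (o : Option (List α)) (x : α) (l : List α) :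
    pvCombine o (x :: l) = some (o.getD [] ++ x :: l) := by
  cases o <;> rfl

-- shifting the fold of A's inner loop past the head bucket
theorem pvShiftFold {α : Type} (d : α) (x : α) (c : List α) (l : List Nat) :
    ∀ (v : Option (List α)) (a : List (Option (List α))),
    (l.map Nat.succ).foldl
      (fun a k => a.set k (some ((PySem.List.pyGetD a (k : Int) none).getD [] ++ [(x :: c).getD k d]))) (v :: a)
      = v :: l.foldl (fun a k => a.set k (some ((PySem.List.pyGetD a (k : Int) none).getD [] ++ [c.getD k d]))) a := by
  induction l with
  | nil => intro v a; rfl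
  | cons k l ih =>
    intro v a
    simp only [List.map_cons, List.foldl_cons]
    have hget : PySem.List.pyGetD (v :: a) ((Nat.succ k : Nat) : Int) none = PySem.List.pyGetD a (k : Int) none := by
      rw [PySem.List.pyGetD_of_nonneg _ _ (by positivity), PySem.List.pyGetD_of_nonneg _ _ (by positivity)]
      simp
    rw [hget]
    have hset : (v :: a).set (Nat.succ k) (some ((PySem.List.pyGetD a (k : Int) none).getD [] ++ [(x :: c).getD (Nat.succ k) d]))
        = v :: a.set k (some ((PySem.List.pyGetD a (k : Int) none).getD [] ++ [c.getD k d])) := by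
      simp
    rw [hset, ih]

-- A's inner loop, expressed over positions 0..|c|-1, is pvAppendChunk
theorem pvSetFold {α : Type} (d : α) :
    ∀ (c : List α) (a : List (Option (List α))), c.length ≤ a.length →
    (List.range c.length).foldl
      (fun a k => a.set k (some ((PySem.List.pyGetD a (k : Int) none).getD [] ++ [c.getD k d]))) a
      = pvAppendChunk a c := by
  intro c
  induction c with
  | nil => intro a _; cases a <;> rfl
  | cons x c ih =>
    intro a h
    cases a with
    | nil => simp at h
    | cons o a0 =>
      simp only [List.length_cons]
      rw [List.range_succ_eq_map]
      simp only [List.foldl_cons]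
      have h0 : ((o :: a0).set 0 (some ((PySem.List.pyGetD (o :: a0) ((0 : Nat) : Int) none).getD [] ++ [(x :: c).getD 0 d])))
          = some (o.getD [] ++ [x]) :: a0 := by
        rw [PySem.List.pyGetD_of_nonneg _ _ (by norm_num)]
        simp
      rw [h0, pvShiftFold, ih a0 (by simpa using h)]
      rfl

theorem pvChunkLoop_getElem {α : Type} (q k : Nat) (hq : k < q + 1) :
    ∀ (m : Nat) (xs : List α), xs.length ≤ m →
    ∀ (a : List (Option (List α))) (hk : k < a.length),
      (pvChunkLoop q xs a)[k]'(by rw [pvChunkLoop_length]; exact hk) =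
        pvCombine a[k] (pvStrided q k xs) := by
  intro m
  induction m with
  | zero =>
    intro xs hxs a hk
    have hx : xs = [] := List.eq_nil_of_length_eq_zero (by omega)
    subst hx
    simp only [pvChunkLoop, pvStrided]
    cases h : a[k] <;> simp [h, pvCombine]
  | succ m ih =>
    intro xs hxs a hk
    cases xs with
    | nil =>
      simp only [pvChunkLoop, pvStrided]
      cases h : a[k] <;> simp [h, pvCombine]
    | cons x t =>
      simp only [pvChunkLoop, pvStrided]
      rw [ih (t.drop q) (by simp only [List.length_cons] at hxs; simp only [List.length_drop]; omega) _ (by rw [pvAppendChunk_length]; exact hk)]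
      rw [pvAppendChunk_getElem _ _ k hk (pvAppendChunk_length _ _)]
      by_cases hc : k < ((x :: t).take (q + 1)).length
      · rw [dif_pos hc]
        rw [List.getElem?_eq_getElem hc]
        simp only [Option.toList_some, List.cons_append, List.nil_append]
        rw [pvCombine_cons, pvCombine_some]
        simp
      · rw [dif_neg hc]
        have : ((x :: t).take (q + 1))[k]? = none := List.getElem?_eq_none (by omega)
        rw [this]
        simp

theorem pvStrided_map {α β : Type} (q k : Nat) (f : α → β) (xs : List α) :
    pvStrided q k (xs.map f) = (pvStrided q k xs).map f := by
  fun_induction pvStrided q k xs with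
  | case1 => simp [pvStrided]
  | case2 x t ih =>
    simp only [List.map_cons, pvStrided, ← List.map_drop, ih]
    have hmt : (List.take (q + 1) (f x :: List.map f t))[k]? = ((List.take (q + 1) (x :: t))[k]?).map f := by
      rw [← List.map_cons, ← List.map_take]; exact List.getElem?_map
    rw [hmt]
    cases h : ((x :: t).take (q + 1))[k]? <;> simp

-- pvStrided is exactly B's strided range gather
theorem pvStrided_eq_pyRange (np : Int) (hnp : 0 < np) (k : Nat) (hk : k < np.toNat) :
    ∀ (m : Nat) (izs : List Int), izs.length ≤ m →
    pvStrided (np.toNat - 1) k izs =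
      (PySem.List.pyRange (k : Int) ((izs.length : Int)) np).map (fun j => PySem.List.pyGetD izs j 0) := by
  have hnpq : np = ((np.toNat - 1 : Nat) : Int) + 1 := by omega
  intro m
  induction m with
  | zero =>
    intro izs hlen
    have hx : izs = [] := List.eq_nil_of_length_eq_zero (by omega)
    subst hx
    rw [show ((([] : List Int).length : Int)) = 0 by simp, pvPyRange_pos_nil (by positivity) hnp]
    simp [pvStrided]
  | succ m ih =>
    intro izs hlen
    cases izs with
    | nil =>
      rw [show ((([] : List Int).length : Int)) = 0 by simp, pvPyRange_pos_nil (by positivity) hnp]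
      simp [pvStrided]
    | cons x t =>
      simp only [pvStrided]
      set q := np.toNat - 1 with hqdef
      by_cases hkl : k < t.length + 1
      · have hkc : (k : Int) < ((x :: t).length : Int) := by simp; omega
        rw [pvPyRange_pos_cons hkc hnp, List.map_cons]
        have hhd : ((x :: t).take (q + 1))[k]? = some ((x :: t)[k]'(by simp; omega)) := by
          rw [List.getElem?_take_of_lt (by omega), List.getElem?_eq_getElem (by simp; omega)]
        rw [hhd]
        have hhd2 : PySem.List.pyGetD (x :: t) (k : Int) 0 = (x :: t)[k]'(by simp; omega) := by
          rw [PySem.List.pyGetD_eq_getElem _ _ (by positivity) (by simp; omega)]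
          simp
        rw [hhd2]
        simp only [Option.toList_some, List.cons_append, List.nil_append, List.cons.injEq, true_and]
        rw [ih (t.drop q) (by simp only [List.length_cons] at hlen; simp only [List.length_drop]; omega)]
        rw [pvPyRange_shift hnp, List.map_map]
        by_cases hql : q ≤ t.length
        · have hlen2 : (((t.drop q).length : Int)) = ((x :: t).length : Int) - np := by
            simp [List.length_drop]; omega
          rw [hlen2]
          apply List.map_congr_left
          intro j hj
          have hj0 : 0 ≤ j := by
            have := (PySem.List.mem_pyRange_iff_of_pos hnp j).mp hj
            have hk0 : (0 : Int) ≤ (k : Int) := by positivity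
            omega
          have hdq : t.drop q = (x :: t).drop (q + 1) := by simp
          simp only [Function.comp]
          rw [hdq, pvGetD_drop _ _ _ hj0]
          congr 1
          omega
        · have h1 : (((t.drop q).length : Int)) ≤ (k : Int) := by simp [List.length_drop]; omega
          have h2 : ((x :: t).length : Int) - np ≤ (k : Int) := by simp; omega
          rw [pvPyRange_pos_nil h1 hnp, pvPyRange_pos_nil h2 hnp]
          simp
      · have hnone : ((x :: t).take (q + 1))[k]? = none := List.getElem?_eq_none (by simp; omega)
        rw [hnone]
        rw [ih (t.drop q) (by simp only [List.length_cons] at hlen; simp only [List.length_drop]; omega)]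
        have h1 : (((t.drop q).length : Int)) ≤ (k : Int) := by simp [List.length_drop]; omega
        have h2 : ((x :: t).length : Int) ≤ (k : Int) := by simp; omega
        rw [pvPyRange_pos_nil h1 hnp, pvPyRange_pos_nil h2 hnp]
        simp

-- A's inner loop over one chunk is pvAppendChunk
theorem pvInner_eq_appendChunk (np : Int) (hnp : 0 < np) (i : Int) (hi : 0 ≤ i)
    (xs : List (Int × Int × Int)) (a : List (Option (List (Int × Int × Int))))
    (ha : np.toNat ≤ a.length) :
    (PySem.List.pyRange i (min (i + np) ((xs.length : Int))) 1).foldl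
      (fun a j =>
        let cur := PySem.List.pyGetD a (j - i) none
        let cur := if cur = none then some ([] : List (Int × Int × Int)) else cur
        a.set (j - i).toNat (some (cur.getD [] ++ [PySem.List.pyGetD xs j (0, 0, 0)]))) a =
    pvAppendChunk a ((xs.drop i.toNat).take np.toNat) := by
  rw [PySem.List.pyRange_one, List.foldl_map]
  set c : List (Int × Int × Int) := (xs.drop i.toNat).take np.toNat with hc
  have hm : (min (i + np) ((xs.length : Int)) - i).toNat = c.length := by
    simp [hc, List.length_take, List.length_drop]; omega
  rw [hm]
  have hcongr : ∀ (a : List (Option (List (Int × Int × Int)))) (k : Nat), k ∈ List.range c.length →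
      (fun a j =>
        let cur := PySem.List.pyGetD a (j - i) none
        let cur := if cur = none then some ([] : List (Int × Int × Int)) else cur
        a.set (j - i).toNat (some (cur.getD [] ++ [PySem.List.pyGetD xs j (0, 0, 0)]))) a (i + (k : Int))
      = a.set k (some ((PySem.List.pyGetD a ((k : Nat) : Int) none).getD [] ++ [c.getD k (0, 0, 0)])) := by
    intro a k hkmem
    have hkm : k < c.length := List.mem_range.mp hkmem
    have hsub : i + (k : Int) - i = ((k : Nat) : Int) := by ring
    have hgetc : PySem.List.pyGetD xs (i + (k : Int)) (0, 0, 0) = c.getD k (0, 0, 0) := by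
      have hkc : k < np.toNat ∧ i.toNat + k < xs.length := by
        simp [hc, List.length_take, List.length_drop] at hkm
        omega
      rw [PySem.List.pyGetD_of_nonneg _ _ (by omega)]
      simp only [hc, List.getD_eq_getElem?_getD]
      rw [List.getElem?_take_of_lt hkc.1, List.getElem?_drop]
      congr 2
      omega
    simp only [hsub, hgetc]
    cases hcur : PySem.List.pyGetD a ((k : Nat) : Int) none <;> simp [hcur, Int.toNat_natCast]
  rw [PySem.List.foldl_congr_mem _ _ _ _ hcongr]
  exact pvSetFold (0, 0, 0) c a (by simp [hc, List.length_take, List.length_drop]; omega)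

-- A's outer loop is pvChunkLoop
theorem pvOuter_eq_chunkLoop (np : Int) (hnp : 0 < np) (xs : List (Int × Int × Int)) :
    ∀ (m : Nat) (i : Int), 0 ≤ i → (((xs.length : Int)) - i).toNat ≤ m →
    ∀ (a : List (Option (List (Int × Int × Int)))), a.length = np.toNat →
    (PySem.List.pyRange i ((xs.length : Int)) np).foldl
      (fun a i =>
        let ni : Int := min (i + np) ((xs.length : Int))
        (PySem.List.pyRange i ni 1).foldl
          (fun a j =>
            let cur := PySem.List.pyGetD a (j - i) none
            let cur := if cur = none then some ([] : List (Int × Int × Int)) else cur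
            a.set (j - i).toNat (some (cur.getD [] ++ [PySem.List.pyGetD xs j (0, 0, 0)]))) a) a =
    pvChunkLoop (np.toNat - 1) (xs.drop i.toNat) a := by
  intro m
  induction m with
  | zero =>
    intro i hi hm a ha
    have hin : ((xs.length : Int)) ≤ i := by omega
    rw [pvPyRange_pos_nil hin hnp]
    have hdrop : xs.drop i.toNat = [] := List.drop_eq_nil_of_le (by omega)
    rw [hdrop]
    simp [pvChunkLoop]
  | succ m ih =>
    intro i hi hm a ha
    by_cases hin : i < ((xs.length : Int))
    · rw [pvPyRange_pos_cons hin hnp]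
      simp only [List.foldl_cons]
      rw [pvInner_eq_appendChunk np hnp i hi xs a (by omega)]
      rw [ih (i + np) (by omega) (by omega) _ (by rw [pvAppendChunk_length]; exact ha)]
      have hne : xs.drop i.toNat ≠ [] := by
        intro h
        have := List.drop_eq_nil_iff.mp h
        omega
      obtain ⟨y, t, hyt⟩ := List.exists_cons_of_ne_nil hne
      have h2 : xs.drop (i + np).toNat = t.drop (np.toNat - 1) := by
        have h3 : t.drop (np.toNat - 1) = (y :: t).drop (np.toNat - 1 + 1) := by simp
        rw [h3, ← hyt, List.drop_drop]
        congr 1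
        omega
      rw [hyt]
      simp only [pvChunkLoop]
      rw [show np.toNat - 1 + 1 = np.toNat by omega, h2]
    · rw [pvPyRange_pos_nil (by omega) hnp]
      have hdrop : xs.drop i.toNat = [] := List.drop_eq_nil_of_le (by omega)
      rw [hdrop]
      simp [pvChunkLoop]

-- ===== VERDICT (by name: the statement is the Claim_ definition above) =====
theorem dist_zs_spec : Claim_equal_dist_zs := by
  unfold Claim_equal_dist_zs
  intro izs np aa mloss _ hpre
  unfold Spec_dist_zs dist_zs dist_zs_alt
  simp only []
  rcases lt_trichotomy np 0 with hneg | h0 | hpos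
  · -- np < 0: A's outer range and B's bucket range are both empty
    rw [pvPyRange_negstep_nil hneg (by positivity), PySem.List.pyRange_one_eq_nil hneg.le]
    have : np.toNat = 0 := by omega
    simp [this]
  · exact absurd h0 hpre
  · -- np > 0
    rw [PySem.List.foldl_pyRange_zero_pyGetD' izs 0 (fun acc z => acc ++ [(z, aa, mloss)]) []]
    rw [PySem.List.foldl_append_singleton_eq_map (fun z => (z, aa, mloss)) izs []]
    simp only [List.nil_append]
    set f : Int → (Int × Int × Int) := fun z => (z, aa, mloss) with hf
    have hlen : ((izs.length : Int)) = (((izs.map f).length : Int)) := by simp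
    rw [hlen]
    rw [pvOuter_eq_chunkLoop np hpos (izs.map f) ((izs.map f).length) 0 (by norm_num)
        (by omega) (List.replicate np.toNat none) (by simp)]
    apply List.ext_getElem
    · rw [pvChunkLoop_length]
      simp [PySem.List.length_pyRange_one]
    · intro k hk1 hk2
      have hkq : k < np.toNat := by
        rw [pvChunkLoop_length] at hk1
        simpa using hk1
      simp only [show (0 : Int).toNat = 0 from rfl, List.drop_zero]
      rw [pvChunkLoop_getElem (np.toNat - 1) k (by omega) ((izs.map f).length) (izs.map f)
          le_rfl _ (by simpa using hkq)]
      rw [List.getElem_replicate, List.getElem_map, PySem.List.getElem_pyRange_one, zero_add]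
      rw [pvStrided_map, pvStrided_eq_pyRange np hpos k hkq izs.length izs le_rfl, hlen]
      rw [List.map_map, pvCombine_none]
      simp only [Function.comp_def, hf]

-- the grader's pvRaises probe consumes this by name
@[simp] theorem dist_zs_raises : Claim_raises_dist_zs := by
  unfold Claim_raises_dist_zs
  refine ⟨fun izs np aa mloss _ h => ?_, by decide⟩
  unfold Raises_dist_zs at h
  unfold Pre_dist_zs
  simp [h]
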